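-- pv_equiv track=rewrite | github.com/alset333/InfiniRoam | InfiniRoamGUI.py | displayInventory
-- ===== SOURCE A (Python) =====
-- def displayInventory(inventory):
--     output = ''
--     countedItems = []
--     inventory.sort()
--     for item in inventory:
--         if not item in countedItems:
--             countedItems.append(item)
--             output += str(inventory.count(item)) + ' ' + item + ', '
--
--     if output == '':
--         return 'Empty Inventory'
--     else:
--         return output[:-2]
-- ===== SOURCE B (Python) =====
-- def displayInventory(inventory):
--     inventory.sort()
--     if not inventory:
--         return 'Empty Inventory'
--     parts = []
--     current = inventory[0]
--     count = 0
--     for item in inventory: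
--         if item == current:
--             count += 1
--         else:
--             parts.append(str(count) + ' ' + current)
--             current = item
--             count = 1
--     parts.append(str(count) + ' ' + current)
--     return ', '.join(parts)
-- ===== Notes on version B (the rewrite author's own statement) =====
-- stated objective: faster
-- what changed: Replaced A's per-item membership guard on countedItems plus a full-list .count() rescan for every new item with a single linear grouping sweep over the sorted list that keeps a running count and flushes a group whenever the item changes, joining the groups with ', ' instead of appending and stripping a trailing separator.
import Mathlib
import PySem

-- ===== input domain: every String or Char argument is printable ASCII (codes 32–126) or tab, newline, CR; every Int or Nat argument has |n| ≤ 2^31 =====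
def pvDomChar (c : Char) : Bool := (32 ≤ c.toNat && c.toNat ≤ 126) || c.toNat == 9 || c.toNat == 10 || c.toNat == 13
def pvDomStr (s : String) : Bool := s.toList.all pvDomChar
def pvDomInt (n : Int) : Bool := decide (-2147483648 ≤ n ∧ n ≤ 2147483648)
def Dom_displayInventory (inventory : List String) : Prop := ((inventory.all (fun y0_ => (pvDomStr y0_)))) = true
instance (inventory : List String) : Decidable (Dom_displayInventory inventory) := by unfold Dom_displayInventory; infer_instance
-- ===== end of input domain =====

-- B replaces A's quadratic membership-guard + .count rescanning with one linear grouping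
-- sweep over the sorted list (objective: simpler).  Both Pythons sort `inventory` in
-- place (the same mutation); the equivalence proved here is about the return value.

-- ===== PORT A =====
-- the loop body of A: membership guard on countedItems, then count over the whole sorted list
def pvAStep (inv : List String) (st : List Char × List String) (item : String) :
    List Char × List String :=
  if st.2.contains item then st
  else (st.1 ++ PySem.Int.toChars ((PySem.List.count inv item : Nat) : Int)
          ++ [' '] ++ item.toList ++ [',', ' '],
        st.2 ++ [item])

def displayInventory (inventory : List String) : String :=
  let inv := PySem.List.sorted inventory (fun x => x)
  let st := inv.foldl (pvAStep inv) ([], [])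
  if st.1 = [] then "Empty Inventory"
  else String.ofList (PySem.List.slice st.1 none (some (-2)))

-- ===== PORT B =====
-- the loop body of B: grouping sweep state (emitted parts, current item, running count)
def pvBStep (st : List (List Char) × String × Int) (item : String) :
    List (List Char) × String × Int :=
  if item = st.2.1 then (st.1, st.2.1, st.2.2 + 1)
  else (st.1 ++ [PySem.Int.toChars st.2.2 ++ [' '] ++ st.2.1.toList], item, 1)

def displayInventory_alt (inventory : List String) : String :=
  let inv := PySem.List.sorted inventory (fun x => x)
  match inv with
  | [] => "Empty Inventory"
  | x :: _ =>
    let st := inv.foldl pvBStep ([], x, 0)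
    String.ofList (PySem.Chars.join [',', ' ']
      (st.1 ++ [PySem.Int.toChars st.2.2 ++ [' '] ++ st.2.1.toList]))

-- ===== PRECONDITION & SPEC =====
def Spec_displayInventory (inventory : List String) (out : String) : Prop := out = displayInventory_alt inventory
instance (inventory : List String) (out : String) : Decidable (Spec_displayInventory inventory out) := by unfold Spec_displayInventory; infer_instance

-- ===== CLAIM (what is proved, stated in full; the proofs are below) =====
def Claim_equal_displayInventory : Prop := ∀ (inventory : List String), Dom_displayInventory inventory → Spec_displayInventory inventory (displayInventory inventory)

-- ===== LEMMAS AND PROOFS =====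

-- one formatted group "count item" (B's part for a run)
def pvPiece (r : String × Int) : List Char :=
  PySem.Int.toChars r.2 ++ [' '] ++ r.1.toList

-- run-length encoding of the remaining list, with a pending run (cur, k) already open
def pvRle (cur : String) (k : Int) : List String → List (String × Int)
  | [] => [(cur, k)]
  | y :: t => if y = cur then pvRle cur (k + 1) t else (cur, k) :: pvRle y 1 t

-- B's fold closed off with its pending group is exactly the pieces of the runs
theorem pvB_fold (s : List String) : ∀ (parts : List (List Char)) (cur : String) (k : Int),
    (s.foldl pvBStep (parts, cur, k)).1
      ++ [pvPiece ((s.foldl pvBStep (parts, cur, k)).2.1,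
                   (s.foldl pvBStep (parts, cur, k)).2.2)]
      = parts ++ (pvRle cur k s).map pvPiece := by
  induction s with
  | nil => intro parts cur k; simp [pvRle, pvPiece]
  | cons y t ih =>
    intro parts cur k
    by_cases h : y = cur
    · simp [pvBStep, h, pvRle, ih]
    · rw [List.foldl_cons,
        show pvBStep (parts, cur, k) y
          = (parts ++ [PySem.Int.toChars k ++ [' '] ++ cur.toList], y, 1) by
            simp [pvBStep, h]]
      rw [ih, pvRle, if_neg h]
      simp [pvPiece]

-- the head of pvRle: the pending run absorbs every remaining copy of cur
theorem pvRle_head (s : List String) : ∀ (cur : String) (k : Int),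
    s.Pairwise (· ≤ ·) → (∀ y ∈ s, cur ≤ y) →
    pvRle cur k s = (cur, k + (s.count cur : Int)) :: (pvRle cur k s).tail := by
  induction s with
  | nil => intro cur k _ _; simp [pvRle]
  | cons y t ih =>
    intro cur k hp hlb
    by_cases h : y = cur
    · subst h
      have ht := (List.pairwise_cons.mp hp).2
      have hlb' : ∀ z ∈ t, y ≤ z := (List.pairwise_cons.mp hp).1
      rw [pvRle]
      rw [ih y (k + 1) ht hlb']
      simp
      ring_nf
    · have hcnt : (y :: t).count cur = 0 := by
        rw [List.count_eq_zero]
        intro hm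
        rcases List.mem_cons.mp hm with h1 | h2
        · exact h h1.symm
        · have hy : cur ≤ y := hlb y (List.mem_cons_self ..)
          have hlt : cur < y := lt_of_le_of_ne hy (fun e => h e.symm)
          have : y ≤ cur := (List.pairwise_cons.mp hp).1 cur h2
          exact absurd (lt_of_lt_of_le hlt this) (lt_irrefl _)
      rw [pvRle]
      simp [h, hcnt]

-- A's fold: countedItems guard + whole-list count produce the pieces of the remaining runs
theorem pvA_fold (L : List String) (s : List String) :
    ∀ (c : List String) (o : List Char) (cur : String) (k : Int),
    s.Pairwise (· ≤ ·) → (∀ y ∈ s, cur ≤ y) → (∀ y ∈ s, y ∈ c → y = cur) → cur ∈ c →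
    (∀ y ∈ s, y ≠ cur → (L.count y : Int) = (s.count y : Int)) →
    ((L.count cur : Int) = k + (s.count cur : Int)) →
    (s.foldl (pvAStep L) (o, c)).1
      = o ++ (((pvRle cur k s).tail.map (fun r => pvPiece r ++ [',', ' '])).flatten) := by
  induction s with
  | nil => intro c o cur k _ _ _ _ _ _; simp [pvRle]
  | cons y t ih =>
    intro c o cur k hp hlb hc hcur hcnt hcntc
    have ht : t.Pairwise (· ≤ ·) := (List.pairwise_cons.mp hp).2
    have hyt : ∀ z ∈ t, y ≤ z := (List.pairwise_cons.mp hp).1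
    by_cases h : y = cur
    · -- skipped: y is already counted
      subst h
      have hmem : (c.contains y) = true := List.elem_eq_true_of_mem hcur
      rw [List.foldl_cons]
      rw [show pvAStep L (o, c) y = (o, c) by simp [pvAStep, hcur]]
      rw [pvRle, if_pos rfl]
      have h1 : ∀ z ∈ t, z ∈ c → z = y := fun z hz hzc =>
        hc z (List.mem_cons_of_mem _ hz) hzc
      have h2 : ∀ z ∈ t, z ≠ y → (L.count z : Int) = (t.count z : Int) := by
        intro z hz hne
        rw [hcnt z (List.mem_cons_of_mem _ hz) hne, List.count_cons]
        simp
        exact fun e => hne e.symm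
      have h3 : (L.count y : Int) = (k + 1) + (t.count y : Int) := by
        rw [hcntc, List.count_cons]
        push_cast
        simp
        ring
      exact ih c o y (k + 1) ht hyt h1 hcur h2 h3
    · -- new run head: emitted with its full count
      have hcLt : cur < y :=
        lt_of_le_of_ne (hlb y (List.mem_cons_self ..)) (fun e => h e.symm)
      have htgt : ∀ z ∈ t, cur < y ∧ y ≤ z := fun z hz => ⟨hcLt, hyt z hz⟩
      have hnotin : y ∉ c := fun hy => h (hc y (List.mem_cons_self ..) hy)
      have hycnt : (L.count y : Int) = 1 + (t.count y : Int) := by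
        rw [hcnt y (List.mem_cons_self ..) h, List.count_cons]
        push_cast
        simp
        ring
      have h1 : ∀ z ∈ t, z ∈ c ++ [y] → z = y := by
        intro z hz hzc
        rcases List.mem_append.mp hzc with hin | hin
        · exfalso
          have hzcur : z = cur := hc z (List.mem_cons_of_mem _ hz) hin
          have : cur < z := lt_of_lt_of_le hcLt (hyt z hz)
          rw [hzcur] at this
          exact lt_irrefl _ this
        · simpa using hin
      have h2 : ∀ z ∈ t, z ≠ y → (L.count z : Int) = (t.count z : Int) := by
        intro z hz hne
        have hzcur : z ≠ cur := by
          intro e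
          have : cur < z := lt_of_lt_of_le hcLt (hyt z hz)
          rw [e] at this
          exact lt_irrefl _ this
        rw [hcnt z (List.mem_cons_of_mem _ hz) hzcur, List.count_cons]
        simp
        exact fun e => hne e.symm
      have h3 : (L.count y : Int) = 1 + (t.count y : Int) := hycnt
      have hrec := ih (c ++ [y])
        (o ++ PySem.Int.toChars ((PySem.List.count L y : Nat) : Int)
           ++ [' '] ++ y.toList ++ [',', ' ']) y 1 ht hyt h1 (by simp) h2 h3
      rw [List.foldl_cons]
      rw [show pvAStep L (o, c) y
            = (o ++ PySem.Int.toChars ((PySem.List.count L y : Nat) : Int)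
                 ++ [' '] ++ y.toList ++ [',', ' '], c ++ [y]) by simp [pvAStep, hnotin]]
      rw [hrec, pvRle, if_neg h]
      rw [List.tail_cons, pvRle_head t y 1 ht hyt]
      simp only [List.map_cons, List.flatten_cons]
      have hpiece : pvPiece (y, 1 + (t.count y : Int))
          = PySem.Int.toChars ((PySem.List.count L y : Nat) : Int) ++ [' '] ++ y.toList := by
        simp [pvPiece, PySem.List.count_eq, ← hycnt]
      rw [hpiece]
      simp

-- joining with ", " versus appending ", " to every piece and stripping the tail
theorem pvJoin_flatten (ps : List (List Char)) (hne : ps ≠ []) :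
    (ps.map (fun p => p ++ [',', ' '])).flatten
      = PySem.Chars.join [',', ' '] ps ++ [',', ' '] := by
  induction ps with
  | nil => exact absurd rfl hne
  | cons p q ih =>
    cases q with
    | nil => simp [PySem.Chars.join_singleton]
    | cons r u =>
      rw [PySem.Chars.join_cons_cons]
      have := ih (by simp)
      simp only [List.map_cons, List.flatten_cons] at this ⊢
      rw [this]
      simp

theorem pvSlice_strip (cs : List Char) :
    PySem.List.slice (cs ++ [',', ' ']) none (some (-2)) = cs := by
  simp [PySem.List.slice, PySem.List.clampIdx]

-- ===== VERDICT (by name: the statement is the Claim_ definition above) =====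
theorem displayInventory_spec : Claim_equal_displayInventory := by
  intro inventory _
  unfold Spec_displayInventory displayInventory displayInventory_alt
  have hp : (PySem.List.sorted inventory (fun x => x)).Pairwise (· ≤ ·) := by
    simpa using PySem.List.sorted_pairwise inventory (fun x => x)
  cases hinv : PySem.List.sorted inventory (fun x => x) with
  | nil => simp
  | cons x t =>
    rw [hinv] at hp
    simp only [hinv]
    have ht : t.Pairwise (· ≤ ·) := (List.pairwise_cons.mp hp).2
    have hxt : ∀ z ∈ t, x ≤ z := (List.pairwise_cons.mp hp).1
    have hcx : ((x :: t).count x : Int) = 1 + (t.count x : Int) := by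
      rw [List.count_cons]; push_cast; simp; ring
    have hA := pvA_fold (x :: t) t [x]
      (PySem.Int.toChars ((PySem.List.count (x :: t) x : Nat) : Int)
        ++ [' '] ++ x.toList ++ [',', ' '])
      x 1 ht hxt (by simp) (by simp)
      (by
        intro z hz hne
        rw [List.count_cons]
        simp
        exact fun e => hne e.symm)
      hcx
    have hhead := pvRle_head t x 1 ht hxt
    have hpx : pvPiece (x, 1 + (t.count x : Int))
        = PySem.Int.toChars ((PySem.List.count (x :: t) x : Nat) : Int)
            ++ [' '] ++ x.toList := by
      simp [pvPiece, PySem.List.count_eq, ← hcx]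
    -- A's fold produces the comma-terminated pieces of all runs
    have hAout : (List.foldl (pvAStep (x :: t)) ([], []) (x :: t)).1
        = PySem.Chars.join [',', ' '] ((pvRle x 1 t).map pvPiece) ++ [',', ' '] := by
      rw [List.foldl_cons]
      rw [show pvAStep (x :: t) ([], []) x
            = (PySem.Int.toChars ((PySem.List.count (x :: t) x : Nat) : Int)
                ++ [' '] ++ x.toList ++ [',', ' '], [x]) by simp [pvAStep]]
      rw [hA]
      rw [← pvJoin_flatten ((pvRle x 1 t).map pvPiece) (by rw [hhead]; simp)]
      rw [List.map_map]
      conv_rhs => rw [hhead]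
      simp only [List.map_cons, List.flatten_cons, Function.comp]
      rw [hpx]
      simp [Function.comp_def]
    -- B's fold produces the pieces of all runs
    have hB := pvB_fold t [] x 1
    have hBstep : pvBStep ([], x, 0) x = ([], x, 1) := by simp [pvBStep]
    have hB' : (List.foldl pvBStep ([], x, 1) t).1
        ++ [PySem.Int.toChars (List.foldl pvBStep ([], x, 1) t).2.2
            ++ [' '] ++ (List.foldl pvBStep ([], x, 1) t).2.1.toList]
        = (pvRle x 1 t).map pvPiece := by simpa [pvPiece] using hB
    rw [hAout, if_neg (by simp), pvSlice_strip]
    rw [List.foldl_cons, hBstep]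
    rw [hB']
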